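-- pv_equiv track=rewrite | github.com/atopile/atopile | src/atopile/layout_server/pcb_manager.py | _pad_net_text_candidates
-- ===== SOURCE A (Python) =====
-- PAD_NET_GENERIC_TOKENS = {"input", "output", "line", "net"}
--
-- PAD_NET_PREFIXES = ("power_in-", "power_vbus-", "power-")
--
-- PAD_NET_TRUNCATE_LENGTHS = (16, 12, 10, 8, 6, 5, 4, 3, 2, 1)
--
-- def _pad_net_text_candidates(text: str) -> list[str]:
--     base = text.strip()
--     if not base:
--         return []
--
--     candidates: list[str] = []
--     seen: set[str] = set()
--
--     def add(candidate: str) -> None: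
--         token = candidate.strip()
--         if not token or token in seen:
--             return
--         seen.add(token)
--         candidates.append(token)
--
--     add(base)
--
--     normalized = base
--     for prefix in PAD_NET_PREFIXES:
--         if normalized.startswith(prefix):
--             normalized = normalized[len(prefix) :]
--     add(normalized)
--
--     tokens = [t for t in normalized.replace("/", "-").split("-") if t.strip()]
--     for token in reversed(tokens):
--         if token.lower() in PAD_NET_GENERIC_TOKENS:
--             continue
--         add(token)
--         add(token.replace("[", "").replace("]", ""))
--
--     for max_len in PAD_NET_TRUNCATE_LENGTHS:
--         if len(normalized) > max_len:
--             add(normalized[:max_len])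
--
--     return candidates
-- ===== SOURCE B (Python) =====
-- PAD_NET_GENERIC_TOKENS = {"input", "output", "line", "net"}
-- PAD_NET_PREFIXES = ("power_in-", "power_vbus-", "power-")
-- PAD_NET_TRUNCATE_LENGTHS = (16, 12, 10, 8, 6, 5, 4, 3, 2, 1)
--
--
-- def _strip_prefixes(s, prefixes):
--     if not prefixes:
--         return s
--     head, rest = prefixes[0], prefixes[1:]
--     return _strip_prefixes(s[len(head):] if s.startswith(head) else s, rest)
--
--
-- def _token_candidates(tokens):
--     # contributions of tokens in reverse order, built by recursion on the front
--     if not tokens: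
--         return []
--     head, rest = tokens[0], tokens[1:]
--     later = _token_candidates(rest)
--     if head.lower() in PAD_NET_GENERIC_TOKENS:
--         return later
--     return later + [head, head.replace("[", "").replace("]", "")]
--
--
-- def _truncations(normalized, lengths):
--     if not lengths:
--         return []
--     n, rest = lengths[0], lengths[1:]
--     tail = _truncations(normalized, rest)
--     return ([normalized[:n]] + tail) if len(normalized) > n else tail
--
--
-- def _dedup(cands, seen):
--     # strip, drop empties, keep first occurrences; builds the output by cons
--     if not cands:
--         return []
--     head, rest = cands[0].strip(), cands[1:]
--     if not head or head in seen:
--         return _dedup(rest, seen)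
--     return [head] + _dedup(rest, seen | {head})
--
--
-- def _pad_net_text_candidates(text: str) -> list[str]:
--     # Recursive decomposition: each phase is a pure recursive function and the
--     # dedup is a cons-building recursion threading a seen-set (no loops, no
--     # mutable accumulator closure).
--     base = text.strip()
--     if not base:
--         return []
--     normalized = _strip_prefixes(base, PAD_NET_PREFIXES)
--     tokens = [t for t in normalized.replace("/", "-").split("-") if t.strip()]
--     raw = [base, normalized] + _token_candidates(tokens) \
--         + _truncations(normalized, PAD_NET_TRUNCATE_LENGTHS)
--     return _dedup(raw, set())
-- ===== Notes on version B (the rewrite author's own statement) =====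
-- stated objective: alternative
-- what changed: Replaces A's imperative single pass with a mutating `add` closure by a fully recursive decomposition: each phase (prefix stripping, token contributions in reverse, truncations) is a pure recursive function producing a flat candidate list, and a final cons-building recursion threading a seen-set does the strip/drop-empty/first-occurrence dedup.
import Mathlib
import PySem

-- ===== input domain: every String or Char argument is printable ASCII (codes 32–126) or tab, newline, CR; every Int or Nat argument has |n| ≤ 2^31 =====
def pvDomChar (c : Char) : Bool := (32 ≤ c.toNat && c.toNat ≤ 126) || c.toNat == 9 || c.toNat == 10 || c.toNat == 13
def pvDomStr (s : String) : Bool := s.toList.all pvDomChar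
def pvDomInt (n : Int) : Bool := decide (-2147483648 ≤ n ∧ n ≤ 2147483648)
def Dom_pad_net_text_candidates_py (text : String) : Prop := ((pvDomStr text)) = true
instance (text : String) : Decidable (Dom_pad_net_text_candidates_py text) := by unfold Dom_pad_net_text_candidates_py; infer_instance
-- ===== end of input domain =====

-- B replaces A's imperative pass with a mutating `add` closure by a fully recursive
-- decomposition: pure recursive phase functions plus a cons-building dedup recursion
-- threading a seen-set (objective: alternative decomposition, same cost).


-- shared module constants
def padGenericTokens : PySem.Set String := PySem.Set.ofList ["input", "output", "line", "net"]
def padPrefixes : List String := ["power_in-", "power_vbus-", "power-"]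
def padTruncLengths : List Int := [16, 12, 10, 8, 6, 5, 4, 3, 2, 1]

-- shared helper code (identical lines in both Pythons)
def padTokens (normalized : String) : List String :=
  ((PySem.Str.split? (PySem.Str.replace normalized "/" "-") "-").getD []).filter
    (fun t => PySem.Str.strip t != "")

def padDebracket (t : String) : String :=
  PySem.Str.replace (PySem.Str.replace t "[" "") "]" ""

-- ===== PORT A =====
-- the closure `add`: state = (candidates, seen)
def padAdd (st : List String × PySem.Set String) (cand : String) : List String × PySem.Set String :=
  let token := PySem.Str.strip cand
  if token = "" ∨ st.2.contains token then st
  else (st.1 ++ [token], PySem.Set.add st.2 token)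

def pad_net_text_candidates_py (text : String) : List String :=
  let base := PySem.Str.strip text
  if base = "" then []
  else
    let st0 := padAdd ([], PySem.Set.empty) base
    let normalized := padPrefixes.foldl
      (fun n p => if PySem.Str.startswith n p then PySem.Str.slice n (some (PySem.Str.len p)) none else n)
      base
    let st1 := padAdd st0 normalized
    let tokens := padTokens normalized
    let st2 := tokens.reverse.foldl
      (fun st tok =>
        if padGenericTokens.contains (PySem.Str.lower tok) then st
        else padAdd (padAdd st tok) (padDebracket tok)) st1
    let st3 := padTruncLengths.foldl
      (fun st n =>
        if PySem.Str.len normalized > n then padAdd st (PySem.Str.slice normalized none (some n))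
        else st) st2
    st3.1

-- ===== PORT B =====
def padStripPrefixes (s : String) : List String → String
  | [] => s
  | p :: rest =>
    padStripPrefixes
      (if PySem.Str.startswith s p then PySem.Str.slice s (some (PySem.Str.len p)) none else s) rest

def padTokenCands : List String → List String
  | [] => []
  | h :: rest =>
    let later := padTokenCands rest
    if padGenericTokens.contains (PySem.Str.lower h) then later
    else later ++ [h, padDebracket h]

def padTruncs (normalized : String) : List Int → List String
  | [] => []
  | n :: rest =>
    let tail := padTruncs normalized rest
    if PySem.Str.len normalized > n then PySem.Str.slice normalized none (some n) :: tail else tail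

def padDedup : List String → PySem.Set String → List String
  | [], _ => []
  | c :: rest, seen =>
    let h := PySem.Str.strip c
    if h = "" ∨ seen.contains h then padDedup rest seen
    else h :: padDedup rest (PySem.Set.union seen [h])

def pad_net_text_candidates_py_alt (text : String) : List String :=
  let base := PySem.Str.strip text
  if base = "" then []
  else
    let normalized := padStripPrefixes base padPrefixes
    let tokens := padTokens normalized
    let raw := [base, normalized] ++ padTokenCands tokens ++ padTruncs normalized padTruncLengths
    padDedup raw PySem.Set.empty

-- ===== PRECONDITION & SPEC =====
def Spec_pad_net_text_candidates_py (text : String) (out : List String) : Prop := out = pad_net_text_candidates_py_alt text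
instance (text : String) (out : List String) : Decidable (Spec_pad_net_text_candidates_py text out) := by unfold Spec_pad_net_text_candidates_py; infer_instance

-- ===== CLAIM (what is proved, stated in full; the proofs are below) =====
def Claim_equal_pad_net_text_candidates_py : Prop := ∀ (text : String), Dom_pad_net_text_candidates_py text → Spec_pad_net_text_candidates_py text (pad_net_text_candidates_py text)

-- ===== LEMMAS AND PROOFS =====

-- the add-step on a duplicated state collapses to a single-list step
def padSStep (l : List String) (x : String) : List String :=
  let t := PySem.Str.strip x
  if t = "" ∨ l.contains t then l else l ++ [t]

lemma padAdd_pair (l : List String) (x : String) :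
    padAdd (l, l) x = (padSStep l x, padSStep l x) := by
  unfold padAdd padSStep PySem.Set.add
  by_cases he : PySem.Str.strip x = "" <;> by_cases hm : PySem.Str.strip x ∈ l <;>
    simp [he, hm]

lemma foldl_padAdd_pair (raw : List String) (l : List String) :
    raw.foldl padAdd (l, l) = (raw.foldl padSStep l, raw.foldl padSStep l) := by
  induction raw generalizing l with
  | nil => rfl
  | cons x xs ih => simp [List.foldl_cons, padAdd_pair, ih]

-- the seen-set dedup recursion computes exactly the new elements of the foldl
lemma foldl_padSStep_eq_dedup (raw : List String) (l : List String) (s : PySem.Set String)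
    (h : ∀ x, x ∈ s ↔ x ∈ l) :
    raw.foldl padSStep l = l ++ padDedup raw s := by
  induction raw generalizing l s with
  | nil => simp [padDedup]
  | cons c rest ih =>
    simp only [List.foldl_cons, padDedup]
    by_cases he : PySem.Str.strip c = "" ∨ PySem.Str.strip c ∈ l
    · have hs : (PySem.Str.strip c = "" ∨ s.contains (PySem.Str.strip c)) := by
        rcases he with he | he
        · exact Or.inl he
        · exact Or.inr (by simp [PySem.Set.contains, (h _).2 he])
      have hl : padSStep l c = l := by
        unfold padSStep
        rcases he with he | he <;> simp [he]
      rw [hl, if_pos hs, ih l s h]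
    · push Not at he
      have hs : ¬ (PySem.Str.strip c = "" ∨ s.contains (PySem.Str.strip c)) := by
        simp only [not_or]
        exact ⟨he.1, by simp [PySem.Set.contains, (h _).not.2 he.2]⟩
      have hl : padSStep l c = l ++ [PySem.Str.strip c] := by
        unfold padSStep
        simp [he.1, he.2]
      rw [hl, if_neg hs]
      rw [ih (l ++ [PySem.Str.strip c]) (PySem.Set.union s [PySem.Str.strip c])
        (by
          intro x
          have hns : PySem.Str.strip c ∉ s := fun hx => he.2 ((h _).1 hx)
          simp [PySem.Set.union, PySem.Set.update, PySem.Set.add, PySem.Set.contains, hns, h x])]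
      simp

-- B's recursive prefix stripping is A's fold
lemma padStripPrefixes_eq (ps : List String) (s : String) :
    padStripPrefixes s ps = ps.foldl
      (fun n p => if PySem.Str.startswith n p then PySem.Str.slice n (some (PySem.Str.len p)) none else n)
      s := by
  induction ps generalizing s with
  | nil => rfl
  | cons p rest ih => simp [padStripPrefixes, List.foldl_cons, ih]

-- B's recursive token contributions = the reversed flat contributions
lemma padTokenCands_eq (toks : List String) :
    padTokenCands toks = toks.reverse.flatMap (fun tok =>
      if padGenericTokens.contains (PySem.Str.lower tok) then []
      else [tok, padDebracket tok]) := by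
  induction toks with
  | nil => rfl
  | cons h t ih =>
    simp only [padTokenCands, List.reverse_cons, List.flatMap_append, List.flatMap_cons,
      List.flatMap_nil, List.append_nil, ih]
    split <;> simp

-- B's recursive truncations = filter-then-map
lemma padTruncs_eq (normalized : String) (ls : List Int) :
    padTruncs normalized ls =
      (ls.filter (fun n => decide (PySem.Str.len normalized > n))).map
        (fun n => PySem.Str.slice normalized none (some n)) := by
  induction ls with
  | nil => rfl
  | cons n rest ih =>
    simp only [padTruncs, ih, List.filter_cons]
    by_cases h : (n : Int) < (normalized.length : Int)
    · simp [PySem.Str.len, h]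
    · simp [PySem.Str.len, h]

-- A's interleaved token loop is the fold of `add` over the flat token candidates
lemma tok_loop_eq (toks : List String) (st : List String × PySem.Set String) :
    toks.foldl
      (fun st tok =>
        if padGenericTokens.contains (PySem.Str.lower tok) then st
        else padAdd (padAdd st tok) (padDebracket tok)) st =
    (toks.flatMap (fun tok =>
        if padGenericTokens.contains (PySem.Str.lower tok) then []
        else [tok, padDebracket tok])).foldl padAdd st := by
  rw [List.foldl_flatMap]
  apply PySem.List.foldl_congr_mem
  intro acc tok _
  split
  · rfl
  · simp only [List.foldl_cons, List.foldl_nil]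

-- A's truncation loop is the fold of `add` over the mapped filtered lengths
lemma trunc_loop_eq (normalized : String) (st : List String × PySem.Set String) :
    padTruncLengths.foldl
      (fun st n =>
        if PySem.Str.len normalized > n then padAdd st (PySem.Str.slice normalized none (some n))
        else st) st =
    ((padTruncLengths.filter (fun n => decide (PySem.Str.len normalized > n))).map
        (fun n => PySem.Str.slice normalized none (some n))).foldl padAdd st := by
  rw [PySem.List.foldl_ite_eq_foldl_filter (p := fun n => PySem.Str.len normalized > n)]
  rw [List.foldl_map]

-- ===== VERDICT (by name: the statement is the Claim_ definition above) =====
theorem pad_net_text_candidates_py_spec : Claim_equal_pad_net_text_candidates_py := by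
  intro text _
  unfold Spec_pad_net_text_candidates_py pad_net_text_candidates_py pad_net_text_candidates_py_alt
  by_cases hb : PySem.Str.strip text = ""
  · simp [hb]
  · simp only [hb, if_false]
    set base := PySem.Str.strip text with hbase
    set normalized := padPrefixes.foldl
      (fun n p => if PySem.Str.startswith n p then PySem.Str.slice n (some (PySem.Str.len p)) none else n)
      base with hnorm
    set toks := padTokens normalized with htoks
    set flat := toks.reverse.flatMap (fun tok =>
        if padGenericTokens.contains (PySem.Str.lower tok) then []
        else [tok, padDebracket tok]) with hflat
    set truncs := (padTruncLengths.filter (fun n => decide (PySem.Str.len normalized > n))).map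
        (fun n => PySem.Str.slice normalized none (some n)) with htruncs
    have hA : (padTruncLengths.foldl
        (fun st n =>
          if PySem.Str.len normalized > n then padAdd st (PySem.Str.slice normalized none (some n))
          else st)
        (toks.reverse.foldl
          (fun st tok =>
            if padGenericTokens.contains (PySem.Str.lower tok) then st
            else padAdd (padAdd st tok) (padDebracket tok))
          (padAdd (padAdd ([], PySem.Set.empty) base) normalized))) =
        (([base, normalized] ++ flat ++ truncs).foldl padAdd ([], PySem.Set.empty)) := by
      rw [trunc_loop_eq, tok_loop_eq, hflat, htruncs]
      simp only [List.foldl_append, List.foldl_cons, List.foldl_nil]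
    rw [hA]
    have hempty : (PySem.Set.empty : PySem.Set String) = ([] : List String) := rfl
    rw [hempty, foldl_padAdd_pair]
    rw [foldl_padSStep_eq_dedup _ [] PySem.Set.empty (by intro x; simp [PySem.Set.empty])]
    rw [padStripPrefixes_eq, ← hnorm, padTokenCands_eq, ← hflat, padTruncs_eq, ← htruncs]
    simp only [List.nil_append]
    rw [hempty]
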